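-- pv_equiv track=rewrite | github.com/TJBFTV/FamilyTreeView | src/abbreviated_name_display.py | _fake_small_caps
-- ===== SOURCE A (Python) =====
-- import unicodedata
--
-- def _fake_small_caps(names, petite_caps=False, **kwargs):
--     # Pango's <span variant="small-caps"> doesn't scale well when zooming the canvas and a Pango warning appears:
--     # "failed to create cairo scaled font, expect ugly output. the offending font is ..."
--     # This function creates fake small caps instead.
--     small_caps_names = []
--     for name in names:
--         if len(name) == 0:
--             continue
--
--         # get char groups, equivalent to char_groups = re.findall(r'[^a-z]+|[a-z]+', name) but with all unicode Ll characters.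
--         char_groups = []
--         group = ""
--         for char in name:
--             char_is_lowercase = unicodedata.category(char) == "Ll"
--             if len(group) == 0:
--                 if char_is_lowercase:
--                     # second group is first lowercase group
--                     char_groups.append("")
--                 # new group
--                 group += char
--                 group_is_lowercase = char_is_lowercase
--             elif char_is_lowercase == group_is_lowercase:
--                 group += char
--             else:
--                 # end of group
--                 if len(group) > 0:
--                     char_groups.append(group)
--                 # new group
--                 group = char
--                 group_is_lowercase = char_is_lowercase
--         if len(group) > 0:
--             # last group
--             char_groups.append(group)
--
--         for i in range(1, len(char_groups), 2): # every second group is lowercase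
--             if char_groups[i] == "":
--                 continue
--             # Use these to see how it looks. It has wrong size when zoomed.
--             # char_groups[i] = '<span variant="small-caps">' + char_groups[i] + "</span>"
--             # char_groups[i] = '<span variant="petite-caps">' + char_groups[i] + "</span>"
--             if petite_caps:
--                 char_groups[i] = "<small><small>" + char_groups[i].upper() + "</small></small>" # similar to petite caps
--             else:
--                 char_groups[i] = "<small>" + char_groups[i].upper() + "</small>" # similar to small caps
--         small_caps_names.append(''.join(char_groups))
--     return small_caps_names
-- ===== SOURCE B (Python) =====
-- import unicodedata
--
--
-- def _fake_small_caps(names, petite_caps=False, **kwargs):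
--     # Per-character emission: no character groups at all. Shifted lowercase-flag
--     # lists (prev/next) detect run boundaries, so each lowercase char is emitted
--     # uppercased with an opening tag when its predecessor is not lowercase and a
--     # closing tag when its successor is not lowercase.
--     open_tag = "<small><small>" if petite_caps else "<small>"
--     close_tag = "</small></small>" if petite_caps else "</small>"
--     out = []
--     for name in names:
--         if not name:
--             continue
--         low = [unicodedata.category(c) == "Ll" for c in name]
--         prev = [False] + low[:-1]
--         nxt = low[1:] + [False]
--         parts = []
--         for c, l, p, n in zip(name, low, prev, nxt):
--             if l:
--                 s = c.upper()
--                 if not p: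
--                     s = open_tag + s
--                 if not n:
--                     s = s + close_tag
--                 parts.append(s)
--             else:
--                 parts.append(c)
--         out.append(''.join(parts))
--     return out
-- ===== Notes on version B (the rewrite author's own statement) =====
-- stated objective: alternative
-- what changed: B never forms character groups: it builds shifted lowercase-flag lists (prev/next) and emits per character, attaching the open/close tags at run boundaries detected by neighbor comparison, instead of A's state machine that collects a group list and wraps its odd-indexed entries.
import Mathlib
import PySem

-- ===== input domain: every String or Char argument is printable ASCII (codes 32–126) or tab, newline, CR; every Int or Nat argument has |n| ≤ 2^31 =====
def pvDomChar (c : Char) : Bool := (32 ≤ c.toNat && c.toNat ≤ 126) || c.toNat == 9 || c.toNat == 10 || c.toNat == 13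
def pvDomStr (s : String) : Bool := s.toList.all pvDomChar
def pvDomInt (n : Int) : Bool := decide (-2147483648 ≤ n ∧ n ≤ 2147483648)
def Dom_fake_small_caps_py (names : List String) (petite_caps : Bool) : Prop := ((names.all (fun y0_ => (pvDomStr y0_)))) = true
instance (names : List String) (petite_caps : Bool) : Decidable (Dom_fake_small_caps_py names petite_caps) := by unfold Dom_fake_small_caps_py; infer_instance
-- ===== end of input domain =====

-- B replaces A's group-collecting state machine (group list + odd-index parity wrapping
-- pass) by a groupless per-character emission: shifted lowercase-flag lists mark run
-- boundaries and the tags are attached to the boundary characters directly.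

-- ===== PORT A =====

-- unicodedata.category(c) == "Ll": exact on the ASCII domain Dom, where Ll is exactly 'a'..'z'
def pvIsLl (c : Char) : Bool := 'a' ≤ c && c ≤ 'z'

-- "<small>…</small>" / "<small><small>…</small></small>" wrapping of an uppercased group
def pvWrap (petite : Bool) (g : List Char) : List Char :=
  if petite then
    "<small><small>".toList ++ PySem.Chars.upper g ++ "</small></small>".toList
  else
    "<small>".toList ++ PySem.Chars.upper g ++ "</small>".toList

-- A's inner char loop: state (char_groups, group, group_is_lowercase) exactly as in the Python
def pvALoop : List Char → List (List Char) → List Char → Bool →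
    List (List Char) × List Char × Bool
  | [], acc, g, gl => (acc, g, gl)
  | c :: rest, acc, g, gl =>
    let cl := pvIsLl c
    if g.length = 0 then
      pvALoop rest (if cl then acc ++ [[]] else acc) [c] cl
    else if cl = gl then
      pvALoop rest acc (g ++ [c]) gl
    else
      pvALoop rest (if g.length > 0 then acc ++ [g] else acc) [c] cl

-- char_groups of one name (loop + the trailing "last group" append)
def pvCharGroups (cs : List Char) : List (List Char) :=
  match pvALoop cs [] [] false with
  | (acc, g, _) => if g.length > 0 then acc ++ [g] else acc

-- 'for i in range(1, len(char_groups), 2): …' — walk the list with its index,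
-- changing exactly the nonempty entries at odd indices
def pvWrapOdd (petite : Bool) : Nat → List (List Char) → List (List Char)
  | _, [] => []
  | i, g :: t =>
    (if i % 2 = 1 then (if g.length = 0 then g else pvWrap petite g) else g)
      :: pvWrapOdd petite (i + 1) t

def fake_small_caps_py (names : List String) (petite_caps : Bool) : List String :=
  names.foldl
    (fun out name =>
      if PySem.Str.len name = 0 then out
      else out ++
        [String.ofList (PySem.Chars.join [] (pvWrapOdd petite_caps 0 (pvCharGroups name.toList)))])
    []

-- ===== PORT B =====

-- open_tag / close_tag computed once, as in Source B
def pvOpen (petite : Bool) : List Char :=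
  if petite then "<small><small>".toList else "<small>".toList
def pvClose (petite : Bool) : List Char :=
  if petite then "</small></small>".toList else "</small>".toList

-- the body of Source B's per-character loop: ((c, l), (p, n)) ↦ the emitted piece
def pvCharPiece (petite : Bool) (x : (Char × Bool) × (Bool × Bool)) : List Char :=
  if x.1.2 then
    (if x.2.1 then [] else pvOpen petite) ++ PySem.Chars.upper [x.1.1] ++
      (if x.2.2 then [] else pvClose petite)
  else [x.1.1]

def fake_small_caps_py_alt (names : List String) (petite_caps : Bool) : List String :=
  names.foldl
    (fun out name =>
      if name.toList.isEmpty then out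
      else
        let low := name.toList.map pvIsLl
        let prev := false :: low.dropLast
        let nxt := low.tail ++ [false]
        out ++ [String.ofList (PySem.Chars.join []
          (((name.toList.zip low).zip (prev.zip nxt)).map (pvCharPiece petite_caps)))])
    []

-- ===== PRECONDITION & SPEC =====
def Spec_fake_small_caps_py (names : List String) (petite_caps : Bool) (out : List String) : Prop := out = fake_small_caps_py_alt names petite_caps
instance (names : List String) (petite_caps : Bool) (out : List String) : Decidable (Spec_fake_small_caps_py names petite_caps out) := by unfold Spec_fake_small_caps_py; infer_instance

-- ===== CLAIM (what is proved, stated in full; the proofs are below) =====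
def Claim_equal_fake_small_caps_py : Prop := ∀ (names : List String) (petite_caps : Bool), Dom_fake_small_caps_py names petite_caps → Spec_fake_small_caps_py names petite_caps (fake_small_caps_py names petite_caps)

-- ===== LEMMAS AND PROOFS =====

-- ''.join of a cons
theorem pvJoin_cons (a : List Char) (l : List (List Char)) :
    PySem.Chars.join [] (a :: l) = a ++ PySem.Chars.join [] l := by
  cases l <;> simp [PySem.Chars.join, List.intercalate, List.intersperse]

-- proof-side run decomposition: the maximal same-key runs of a char list
def pvMerge (gl : Bool) (g : List Char) : List (Bool × List Char) → List (Bool × List Char)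
  | [] => [(gl, g)]
  | (b, r) :: t => if b = gl then (gl, g ++ r) :: t else (gl, g) :: (b, r) :: t

def pvGroupby (key : Char → Bool) : List Char → List (Bool × List Char)
  | [] => []
  | c :: rest =>
    match pvGroupby key rest with
    | [] => [(key c, [c])]
    | (b, r) :: t => if key c = b then (b, c :: r) :: t else (key c, [c]) :: (b, r) :: t

-- a lowercase run is wrapped, any other run kept verbatim
def pvPiece (petite : Bool) (p : Bool × List Char) : List Char :=
  if p.1 then pvWrap petite p.2 else p.2

-- the canonical per-name output both programs produce
def pvRunsJoin (petite : Bool) (cs : List Char) : List Char :=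
  PySem.Chars.join [] ((pvGroupby pvIsLl cs).map (pvPiece petite))

theorem pvGroupby_cons (key : Char → Bool) (c : Char) (rest : List Char) :
    pvGroupby key (c :: rest) = pvMerge (key c) [c] (pvGroupby key rest) := by
  cases h : pvGroupby key rest with
  | nil => simp [pvGroupby, pvMerge, h]
  | cons p t =>
    obtain ⟨b, r⟩ := p
    by_cases hb : key c = b <;> simp [pvGroupby, pvMerge, h, hb, eq_comm (a := b)]

theorem pvGroupby_ne_nil (key : Char → Bool) (c : Char) (rest : List Char) :
    pvGroupby key (c :: rest) ≠ [] := by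
  rw [pvGroupby_cons]
  cases h : pvGroupby key rest with
  | nil => simp [pvMerge]
  | cons p t => obtain ⟨b, r⟩ := p; by_cases hb : b = key c <;> simp [pvMerge, hb]

theorem pvALoop_merge :
    ∀ (cs : List Char) (acc : List (List Char)) (g : List Char) (gl : Bool), g ≠ [] →
    (match pvALoop cs acc g gl with
     | (acc', g', _) => if g'.length > 0 then acc' ++ [g'] else acc')
      = acc ++ (pvMerge gl g (pvGroupby pvIsLl cs)).map Prod.snd := by
  intro cs
  induction cs with
  | nil =>
    intro acc g gl hg
    simp [pvALoop, pvMerge, pvGroupby, List.length_pos_iff, hg]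
  | cons c rest ih =>
    intro acc g gl hg
    rw [pvGroupby_cons]
    have hgl : ¬ g.length = 0 := by simpa using hg
    by_cases hcl : pvIsLl c = gl
    · have h1 : pvALoop (c :: rest) acc g gl = pvALoop rest acc (g ++ [c]) gl := by
        simp [pvALoop, hgl, hcl]
      rw [h1, ih acc (g ++ [c]) gl (by simp)]
      congr 1
      cases h : pvGroupby pvIsLl rest with
      | nil => simp [pvMerge, ← hcl]
      | cons p t =>
        obtain ⟨b, r⟩ := p
        by_cases hb : b = pvIsLl c
        · simp [pvMerge, hb, ← hcl]
        · simp [pvMerge, hb, ← hcl]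
    · have h1 : pvALoop (c :: rest) acc g gl = pvALoop rest (acc ++ [g]) [c] (pvIsLl c) := by
        simp [pvALoop, hgl, hcl, List.length_pos_iff, hg]
      rw [h1, ih (acc ++ [g]) [c] (pvIsLl c) (by simp)]
      cases h : pvGroupby pvIsLl rest with
      | nil => simp [pvMerge, hcl]
      | cons p t =>
        obtain ⟨b, r⟩ := p
        by_cases hb : b = pvIsLl c
        · simp [pvMerge, hb, hcl]
        · simp [pvMerge, hb, hcl]

-- char_groups = optional "" placeholder ++ the runs of the groupby
theorem pvCharGroups_eq (c : Char) (rest : List Char) :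
    pvCharGroups (c :: rest)
      = (if pvIsLl c then [[]] else []) ++ (pvGroupby pvIsLl (c :: rest)).map Prod.snd := by
  have h0 : pvALoop (c :: rest) [] [] false = pvALoop rest (if pvIsLl c then [[]] else []) [c] (pvIsLl c) := by
    simp [pvALoop]
  have := pvALoop_merge rest (if pvIsLl c then [[]] else []) [c] (pvIsLl c) (by simp)
  unfold pvCharGroups
  rw [h0, this, pvGroupby_cons]

-- every run produced by groupby is nonempty
theorem pvGroupby_snd_ne_nil (key : Char → Bool) :
    ∀ cs, ∀ p ∈ pvGroupby key cs, p.2 ≠ [] := by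
  intro cs
  induction cs with
  | nil => simp [pvGroupby]
  | cons c rest ih =>
    intro p hp
    cases h : pvGroupby key rest with
    | nil => simp [pvGroupby, h] at hp; simp [hp]
    | cons q t =>
      obtain ⟨b, r⟩ := q
      by_cases hb : key c = b
      · simp [pvGroupby, h, hb] at hp
        rcases hp with hp | hp
        · simp [hp]
        · exact ih p (h ▸ List.mem_cons_of_mem _ hp)
      · simp [pvGroupby, h, hb] at hp
        rcases hp with hp | hp | hp
        · simp [hp]
        · exact ih p (h ▸ (by simp [hp]))
        · exact ih p (h ▸ List.mem_cons_of_mem _ hp)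

-- the head run carries the key of the first char
theorem pvGroupby_head (key : Char → Bool) (c : Char) (rest : List Char) :
    ∀ p ∈ (pvGroupby key (c :: rest)).head?, p.1 = key c := by
  cases h : pvGroupby key rest with
  | nil => simp [pvGroupby, h]
  | cons q t =>
    obtain ⟨b, r⟩ := q
    by_cases hb : key c = b <;> simp [pvGroupby, h, hb]

-- run keys strictly alternate, starting from a given first key
def pvAlt : Bool → List (Bool × List Char) → Prop
  | _, [] => True
  | b, p :: t => p.1 = b ∧ pvAlt (!b) t

theorem pvGroupby_alt (key : Char → Bool) :
    ∀ (rest : List Char) (c : Char), pvAlt (key c) (pvGroupby key (c :: rest)) := by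
  intro rest
  induction rest with
  | nil => intro c; exact ⟨rfl, trivial⟩
  | cons d rest' ih =>
    intro c
    have hhead := pvGroupby_head key d rest'
    cases h : pvGroupby key (d :: rest') with
    | nil =>
      rw [pvGroupby_cons, h]
      exact ⟨rfl, trivial⟩
    | cons q t =>
      obtain ⟨b, r⟩ := q
      have hb' : b = key d := by simpa using hhead ⟨b, r⟩ (by simp [h])
      have ihd : pvAlt (key d) ((b, r) :: t) := h ▸ ih d
      rw [pvGroupby_cons, h]
      by_cases hb : b = key c
      · rw [show pvMerge (key c) [c] ((b, r) :: t) = (key c, c :: r) :: t from by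
          simp [pvMerge, hb]]
        refine ⟨rfl, ?_⟩
        have hcd : key c = key d := by rw [← hb, hb']
        rw [hcd]
        exact ihd.2
      · have hbn : b = !key c := by cases hkc : key c <;> cases hbv : b <;> simp_all
        rw [show pvMerge (key c) [c] ((b, r) :: t) = (key c, [c]) :: (b, r) :: t from by
          simp [pvMerge, hb]]
        refine ⟨rfl, hbn, ?_⟩
        have h2 := ihd.2
        rw [hb'] at hbn
        rw [hbn, Bool.not_not] at h2
        simpa using h2

-- the parity pass over the run images equals the per-run pieces, provided the first
-- run's key is true exactly when the starting index is odd
theorem pvWrapOdd_runs (petite : Bool) :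
    ∀ (rs : List (Bool × List Char)) (b : Bool) (i : Nat),
      pvAlt b rs →
      (∀ p ∈ rs, p.2 ≠ []) →
      (b = true ↔ i % 2 = 1) →
      pvWrapOdd petite i (rs.map Prod.snd) = rs.map (pvPiece petite) := by
  intro rs
  induction rs with
  | nil => intro b i _ _ _; simp [pvWrapOdd]
  | cons p t ih =>
    intro b i halt hne hb
    obtain ⟨b0, r⟩ := p
    have hb0 : b0 = b := halt.1
    have hr : r ≠ [] := by simpa using hne ⟨b0, r⟩ (by simp)
    have htail : pvWrapOdd petite (i + 1) (t.map Prod.snd) = t.map (pvPiece petite) := by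
      refine ih (!b) (i + 1) halt.2 (fun q hq => hne q (List.mem_cons_of_mem _ hq)) ?_
      cases b
      · have : ¬ i % 2 = 1 := by simpa using hb
        simp; omega
      · have : i % 2 = 1 := hb.mp rfl
        simp; omega
    simp only [List.map_cons, pvWrapOdd]
    subst hb0
    cases b0
    · have hio : ¬ i % 2 = 1 := by simpa using hb
      simp [hio, htail, pvPiece]
    · have hio : i % 2 = 1 := hb.mp rfl
      simp [hio, htail, pvPiece, hr]

-- ''.join skips an empty leading piece
theorem pvJoin_nil_cons (l : List (List Char)) :
    PySem.Chars.join [] ([] :: l) = PySem.Chars.join [] l := by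
  cases l <;> simp [PySem.Chars.join, List.intercalate]

-- one nonempty name: A's grouped-and-parity-wrapped string is the canonical run string
theorem pvPerName (petite : Bool) (c : Char) (rest : List Char) :
    PySem.Chars.join [] (pvWrapOdd petite 0 (pvCharGroups (c :: rest)))
      = pvRunsJoin petite (c :: rest) := by
  have halt := pvGroupby_alt pvIsLl rest c
  have hne := pvGroupby_snd_ne_nil pvIsLl (c :: rest)
  unfold pvRunsJoin
  rw [pvCharGroups_eq]
  by_cases hc : pvIsLl c = true
  · rw [hc] at halt
    rw [if_pos hc, List.singleton_append]
    have h1 : pvWrapOdd petite 0 ([] :: (pvGroupby pvIsLl (c :: rest)).map Prod.snd)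
        = [] :: pvWrapOdd petite 1 ((pvGroupby pvIsLl (c :: rest)).map Prod.snd) := by
      simp [pvWrapOdd]
    rw [h1, pvWrapOdd_runs petite _ true 1 halt hne (by simp), pvJoin_nil_cons]
  · have hc' : pvIsLl c = false := by simpa using hc
    rw [hc'] at halt
    rw [if_neg hc, List.nil_append]
    rw [pvWrapOdd_runs petite _ false 0 halt hne (by simp)]

-- A's foldl over names, with its accumulator made explicit, is the canonical filter-map
theorem pvFold_eq (petite : Bool) :
    ∀ (names : List String) (out : List String),
      names.foldl
        (fun out name =>
          if PySem.Str.len name = 0 then out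
          else out ++
            [String.ofList (PySem.Chars.join [] (pvWrapOdd petite 0 (pvCharGroups name.toList)))])
        out
      = out ++ (names.filter (fun n => !n.toList.isEmpty)).map
          (fun name => String.ofList (pvRunsJoin petite name.toList)) := by
  intro names
  induction names with
  | nil => intro out; simp
  | cons n rest ih =>
    intro out
    cases hn : n.toList with
    | nil =>
      rw [List.foldl_cons]
      rw [show (if PySem.Str.len n = 0 then out
          else out ++ [String.ofList (PySem.Chars.join []
            (pvWrapOdd petite 0 (pvCharGroups n.toList)))]) = out from by simp [hn]]
      rw [ih, List.filter_cons_of_neg (by simp [hn])]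
    | cons c cs =>
      have hlen : ¬ PySem.Str.len n = 0 := by simp [hn]; omega
      rw [List.foldl_cons]
      simp only [hlen, if_false]
      rw [ih]
      rw [List.filter_cons_of_pos (by simp [hn])]
      rw [List.map_cons, List.append_assoc]
      congr 2
      simp only [List.singleton_append]
      congr 2
      rw [hn, pvPerName]

-- ===== B side =====

-- is the first char lowercase? (the 'next' flag B reads at each position)
def pvHeadLow : List Char → Bool
  | [] => false
  | c :: _ => pvIsLl c

-- B's emission as a structural recursion carrying the previous char's flag
def pvEmitAux (petite : Bool) : Bool → List Char → List (List Char)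
  | _, [] => []
  | p, c :: rest =>
    pvCharPiece petite ((c, pvIsLl c), (p, pvHeadLow rest)) :: pvEmitAux petite (pvIsLl c) rest

-- B's zip of the char list with the three flag lists is that recursion
theorem pvZip_eq_emitAux (petite : Bool) :
    ∀ (cs : List Char) (p : Bool),
      (((cs.zip (cs.map pvIsLl)).zip
          ((p :: (cs.map pvIsLl).dropLast).zip ((cs.map pvIsLl).tail ++ [false]))).map
        (pvCharPiece petite))
      = pvEmitAux petite p cs := by
  intro cs
  induction cs with
  | nil => intro p; simp [pvEmitAux]
  | cons c rest ih =>
    intro p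
    cases rest with
    | nil => simp [pvEmitAux, pvHeadLow]
    | cons d r' =>
      have h := ih (pvIsLl c)
      simp only [List.map_cons, List.zip_cons_cons, List.tail_cons, List.dropLast_cons₂,
        List.cons_append, pvEmitAux, pvHeadLow] at h ⊢
      rw [h]

theorem pvWrap_open_close (petite : Bool) (g : List Char) :
    pvWrap petite g = pvOpen petite ++ PySem.Chars.upper g ++ pvClose petite := by
  cases petite <;> simp [pvWrap, pvOpen, pvClose]

-- runsJoin recurrences used below
theorem pvRunsJoin_cons_notLl (petite : Bool) (c : Char) (rest : List Char)
    (hc : pvIsLl c = false) :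
    pvRunsJoin petite (c :: rest) = c :: pvRunsJoin petite rest := by
  unfold pvRunsJoin
  rw [pvGroupby_cons, hc]
  cases h : pvGroupby pvIsLl rest with
  | nil => simp [pvMerge, pvPiece, PySem.Chars.join, List.intercalate]
  | cons q t =>
    obtain ⟨b, r⟩ := q
    cases b
    · simp [pvMerge, List.map_cons, pvJoin_cons, pvPiece]
    · simp [pvMerge, List.map_cons, pvJoin_cons, pvPiece]

theorem pvRunsJoin_cons_end (petite : Bool) (c : Char) (rest : List Char)
    (hc : pvIsLl c = true) (hd : pvHeadLow rest = false) :
    pvRunsJoin petite (c :: rest)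
      = pvOpen petite ++ PySem.Chars.upper [c] ++ pvClose petite ++ pvRunsJoin petite rest := by
  have hmerge : pvGroupby pvIsLl (c :: rest)
      = (true, [c]) :: pvGroupby pvIsLl rest := by
    rw [pvGroupby_cons, hc]
    cases hrest : rest with
    | nil => simp [pvGroupby, pvMerge]
    | cons d r' =>
      have hdl : pvIsLl d = false := by simpa [pvHeadLow, hrest] using hd
      cases h : pvGroupby pvIsLl (d :: r') with
      | nil => exact absurd h (pvGroupby_ne_nil pvIsLl d r')
      | cons q t =>
        obtain ⟨b, r⟩ := q
        have hb : b = pvIsLl d := by simpa using pvGroupby_head pvIsLl d r' ⟨b, r⟩ (by simp [h])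
        rw [hb, hdl]
        simp [pvMerge]
  unfold pvRunsJoin
  rw [hmerge, List.map_cons, pvJoin_cons]
  rw [show pvPiece petite (true, [c]) = pvOpen petite ++ PySem.Chars.upper [c] ++ pvClose petite from by
    simp [pvPiece, pvWrap_open_close]]

theorem pvRunsJoin_cons_mid (petite : Bool) (c : Char) (rest : List Char)
    (hc : pvIsLl c = true) (hd : pvHeadLow rest = true) :
    ∃ X, pvRunsJoin petite (c :: rest) = pvOpen petite ++ PySem.Chars.upper [c] ++ X
      ∧ pvRunsJoin petite rest = pvOpen petite ++ X := by
  obtain ⟨d, r', hrest⟩ : ∃ d r', rest = d :: r' := by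
    cases rest with
    | nil => simp [pvHeadLow] at hd
    | cons d r' => exact ⟨d, r', rfl⟩
  subst hrest
  cases h : pvGroupby pvIsLl (d :: r') with
  | nil => exact absurd h (pvGroupby_ne_nil pvIsLl d r')
  | cons q t =>
    obtain ⟨b, r⟩ := q
    have hdl : pvIsLl d = true := by simpa [pvHeadLow] using hd
    have hb : b = true := by
      have := pvGroupby_head pvIsLl d r' ⟨b, r⟩ (by simp [h])
      simpa [hdl] using this
    subst hb
    have hmerge : pvGroupby pvIsLl (c :: d :: r') = (true, c :: r) :: t := by
      rw [pvGroupby_cons, hc, h]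
      simp [pvMerge]
    refine ⟨PySem.Chars.upper r ++ pvClose petite ++ PySem.Chars.join [] (t.map (pvPiece petite)), ?_, ?_⟩
    · unfold pvRunsJoin
      rw [hmerge, List.map_cons, pvJoin_cons]
      rw [show pvPiece petite (true, c :: r) = pvOpen petite ++ PySem.Chars.upper (c :: r) ++ pvClose petite from by
        simp [pvPiece, pvWrap_open_close]]
      rw [show PySem.Chars.upper (c :: r) = PySem.Chars.upperChar c :: PySem.Chars.upper r from by
        simp [PySem.Chars.upper]]
      simp [PySem.Chars.upper, List.append_assoc]
    · unfold pvRunsJoin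
      rw [h, List.map_cons, pvJoin_cons]
      rw [show pvPiece petite (true, r) = pvOpen petite ++ PySem.Chars.upper r ++ pvClose petite from by
        simp [pvPiece, pvWrap_open_close]]
      simp [List.append_assoc]

-- the heart of the proof: B's per-character emission joins to the canonical run string
theorem pvEmit_runs (petite : Bool) :
    ∀ cs : List Char,
      PySem.Chars.join [] (pvEmitAux petite false cs) = pvRunsJoin petite cs
      ∧ (pvHeadLow cs = true →
          pvOpen petite ++ PySem.Chars.join [] (pvEmitAux petite true cs) = pvRunsJoin petite cs)
      ∧ (pvHeadLow cs = false → pvEmitAux petite true cs = pvEmitAux petite false cs) := by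
  intro cs
  induction cs with
  | nil =>
    refine ⟨?_, ?_, ?_⟩
    · simp [pvEmitAux, pvRunsJoin, pvGroupby, PySem.Chars.join, List.intercalate]
    · intro h; simp [pvHeadLow] at h
    · intro _; rfl
  | cons c rest ih =>
    obtain ⟨ih1, ih2, ih3⟩ := ih
    by_cases hc : pvIsLl c = true
    · by_cases hd : pvHeadLow rest = true
      · -- lowercase run continues
        obtain ⟨X, hX1, hX2⟩ := pvRunsJoin_cons_mid petite c rest hc hd
        have hXe : PySem.Chars.join [] (pvEmitAux petite true rest) = X :=
          List.append_cancel_left (by rw [ih2 hd, hX2])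
        refine ⟨?_, ?_, ?_⟩
        · simp only [pvEmitAux, pvCharPiece, hc, hd, Bool.false_eq_true, if_false, if_true,
            pvJoin_cons]
          rw [hXe, hX1]
          simp [List.append_assoc]
        · intro _
          simp only [pvEmitAux, pvCharPiece, hc, hd, if_true, pvJoin_cons]
          rw [hXe, hX1]
          simp [List.append_assoc]
        · intro h; simp [pvHeadLow, hc] at h
      · -- lowercase run of c ends here
        have hd' : pvHeadLow rest = false := by simpa using hd
        have hEnd := pvRunsJoin_cons_end petite c rest hc hd'
        have hTail : pvEmitAux petite true rest = pvEmitAux petite false rest := ih3 hd'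
        refine ⟨?_, ?_, ?_⟩
        · simp only [pvEmitAux, pvCharPiece, hc, hd', Bool.false_eq_true, if_false, if_true,
            pvJoin_cons]
          rw [hTail, ih1, hEnd]
        · intro _
          simp only [pvEmitAux, pvCharPiece, hc, hd', Bool.false_eq_true, if_false, if_true,
            pvJoin_cons]
          rw [hTail, ih1, hEnd]
          simp [List.append_assoc]
        · intro h; simp [pvHeadLow, hc] at h
    · -- non-lowercase char: emitted verbatim, prev flag irrelevant
      have hc' : pvIsLl c = false := by simpa using hc
      have hR := pvRunsJoin_cons_notLl petite c rest hc'
      refine ⟨?_, ?_, ?_⟩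
      · simp only [pvEmitAux, pvCharPiece, hc', Bool.false_eq_true, if_false, pvJoin_cons]
        rw [ih1, hR]
        rfl
      · intro h; simp [pvHeadLow, hc'] at h
      · intro _
        simp [pvEmitAux, pvCharPiece, hc']

-- B's foldl over names, with its accumulator made explicit, is the same canonical filter-map
theorem pvFoldB_eq (petite : Bool) :
    ∀ (names : List String) (out : List String),
      names.foldl
        (fun out name =>
          if name.toList.isEmpty then out
          else
            let low := name.toList.map pvIsLl
            let prev := false :: low.dropLast
            let nxt := low.tail ++ [false]
            out ++ [String.ofList (PySem.Chars.join []
              (((name.toList.zip low).zip (prev.zip nxt)).map (pvCharPiece petite)))])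
        out
      = out ++ (names.filter (fun n => !n.toList.isEmpty)).map
          (fun name => String.ofList (pvRunsJoin petite name.toList)) := by
  intro names
  induction names with
  | nil => intro out; simp
  | cons n rest ih =>
    intro out
    by_cases hn : n.toList.isEmpty
    · rw [List.foldl_cons]
      simp only [hn, if_true]
      rw [ih, List.filter_cons_of_neg (by simp [hn])]
    · rw [List.foldl_cons]
      simp only [hn, Bool.false_eq_true, if_false]
      rw [ih, List.filter_cons_of_pos (by simpa using hn)]
      rw [List.map_cons, List.append_assoc]
      congr 2
      simp only [List.singleton_append]
      congr 2
      rw [pvZip_eq_emitAux petite n.toList false, (pvEmit_runs petite n.toList).1]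

-- ===== VERDICT (by name: the statement is the Claim_ definition above) =====
theorem fake_small_caps_py_spec : Claim_equal_fake_small_caps_py := by
  intro names petite_caps _
  unfold Spec_fake_small_caps_py fake_small_caps_py fake_small_caps_py_alt
  rw [pvFold_eq, pvFoldB_eq]
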